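-- pv_equiv track=rewrite | github.com/p2635/AdventOfCode2022 | day10/Day10.py | get_sprite_position
-- ===== SOURCE A (Python) =====
-- def get_sprite_position(sprite_pos = 0, sprite_width = 3):
--     if sprite_pos < 0:
--         sprite_pos = 0
--     pixel_band = ['.' for pixel in range(40)]
--     for position in range(sprite_pos, sprite_pos + sprite_width):
--         try:
--             pixel_band[position] = '#'
--         except: # Having problems with index out of range
--             pass
--     return pixel_band
-- ===== SOURCE B (Python) =====
-- def get_sprite_position(sprite_pos=0, sprite_width=3):
--     s = 0 if sprite_pos < 0 else sprite_pos
--     return ['#' if s <= i < s + sprite_width else '.' for i in range(40)]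
-- ===== Notes on version B (the rewrite author's own statement) =====
-- stated objective: simpler
-- what changed: Replaces A's fill-then-overwrite two-phase approach (init 40 dots, then mutate every index of the sprite window under try/except) with a single comprehension over the 40 output pixels deciding each one arithmetically, so no mutation, no exception handling, and no iteration over the (possibly huge) sprite window.
import Mathlib
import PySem

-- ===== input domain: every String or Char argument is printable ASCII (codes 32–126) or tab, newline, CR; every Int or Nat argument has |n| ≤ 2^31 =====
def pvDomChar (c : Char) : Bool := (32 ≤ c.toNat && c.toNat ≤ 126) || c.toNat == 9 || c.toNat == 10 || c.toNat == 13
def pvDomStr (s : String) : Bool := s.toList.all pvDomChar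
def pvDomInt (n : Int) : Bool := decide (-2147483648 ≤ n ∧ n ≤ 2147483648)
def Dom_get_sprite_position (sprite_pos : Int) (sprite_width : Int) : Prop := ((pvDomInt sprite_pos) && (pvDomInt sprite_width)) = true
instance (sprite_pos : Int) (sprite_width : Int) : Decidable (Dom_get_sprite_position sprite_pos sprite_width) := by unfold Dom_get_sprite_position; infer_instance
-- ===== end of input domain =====

-- B replaces A's fill-then-overwrite loop (with try/except) by one comprehension over
-- all 40 pixels deciding each directly: simpler, no mutation, no exception handling.

-- ===== PORT A =====
-- loop body of A: pixel_band[position] = '#' guarded by try/except (negative index wraps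
-- by the band length 40; an out-of-range assignment raises IndexError, swallowed → no-op)
def pvStep (band : List String) (pos : Int) : List String :=
  let j := if pos < 0 then pos + 40 else pos
  if 0 ≤ j ∧ j < 40 then band.set j.toNat "#" else band

def get_sprite_position (sprite_pos : Int) (sprite_width : Int) : List String :=
  -- if sprite_pos < 0: sprite_pos = 0
  let sp := if sprite_pos < 0 then 0 else sprite_pos
  -- pixel_band = ['.' for pixel in range(40)]
  let pixel_band := (PySem.List.pyRange 0 40 1).map (fun _ => ".")
  -- for position in range(sprite_pos, sprite_pos + sprite_width): pixel_band[position] = '#'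
  (PySem.List.pyRange sp (sp + sprite_width) 1).foldl pvStep pixel_band

-- ===== PORT B =====
def get_sprite_position_alt (sprite_pos : Int) (sprite_width : Int) : List String :=
  let s := if sprite_pos < 0 then 0 else sprite_pos
  (PySem.List.pyRange 0 40 1).map
    (fun i => if s ≤ i ∧ i < s + sprite_width then "#" else ".")

-- ===== PRECONDITION & SPEC =====
def Spec_get_sprite_position (sprite_pos : Int) (sprite_width : Int) (out : List String) : Prop := out = get_sprite_position_alt sprite_pos sprite_width
instance (sprite_pos : Int) (sprite_width : Int) (out : List String) : Decidable (Spec_get_sprite_position sprite_pos sprite_width out) := by unfold Spec_get_sprite_position; infer_instance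

-- ===== CLAIM (what is proved, stated in full; the proofs are below) =====
def Claim_equal_get_sprite_position : Prop := ∀ (sprite_pos : Int) (sprite_width : Int), Dom_get_sprite_position sprite_pos sprite_width → Spec_get_sprite_position sprite_pos sprite_width (get_sprite_position sprite_pos sprite_width)

-- ===== LEMMAS AND PROOFS =====

-- The loop of A, characterised elementwise: after folding the sprite window
-- [s, e) over a 40-element band, pixel i is "#" iff s ≤ i < e (and i < 40),
-- otherwise it keeps band's value.
lemma loop_getElem? (n : Nat) : ∀ (s e : Int), (e - s).toNat = n → 0 ≤ s →
    ∀ (band : List String), band.length = 40 → ∀ (i : Nat),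
    ((PySem.List.pyRange s e 1).foldl pvStep band)[i]? =
      if s ≤ (i : Int) ∧ (i : Int) < e ∧ i < 40 then some "#" else band[i]? := by
  induction n with
  | zero =>
    intro s e hn hs band hlen i
    rw [PySem.List.pyRange_one_eq_nil (by omega)]
    simp only [List.foldl_nil]
    rw [if_neg (by omega)]
  | succ n ih =>
    intro s e hn hs band hlen i
    rw [PySem.List.pyRange_one_cons (by omega)]
    simp only [List.foldl_cons]
    have hstep : pvStep band s = if 0 ≤ s ∧ s < 40 then band.set s.toNat "#" else band := by
      unfold pvStep
      rw [if_neg (show ¬ s < 0 by omega)]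
    by_cases h40 : s < 40
    · rw [hstep, if_pos ⟨hs, h40⟩,
          ih (s+1) e (by omega) (by omega) _ (by simp [hlen]) i,
          List.getElem?_set]
      split_ifs <;> first | rfl | omega
    · rw [hstep, if_neg (by omega),
          ih (s+1) e (by omega) (by omega) band hlen i]
      split_ifs <;> first | rfl | omega

lemma band_eq (sprite_pos sprite_width : Int) :
    get_sprite_position sprite_pos sprite_width = get_sprite_position_alt sprite_pos sprite_width := by
  apply List.ext_getElem?
  intro i
  unfold get_sprite_position get_sprite_position_alt
  simp only []
  set s : Int := if sprite_pos < 0 then 0 else sprite_pos with hsdef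
  have hs : 0 ≤ s := by rw [hsdef]; split_ifs <;> omega
  rw [loop_getElem? (sprite_width).toNat s (s + sprite_width) (by omega) hs _
        (by simp [PySem.List.length_pyRange_one]) i]
  by_cases hi : i < 40
  · rw [show (40:Int) = ((40:Nat):Int) by norm_num,
        PySem.List.getElem?_map_pyRange_zero _ _ _ hi,
        PySem.List.getElem?_map_pyRange_zero _ _ _ hi]
    split_ifs <;> first | rfl | omega
  · have h1 : ¬ (s ≤ (i : Int) ∧ (i : Int) < s + sprite_width ∧ i < 40) := by omega
    rw [if_neg h1, List.getElem?_eq_none (by simp [PySem.List.length_pyRange_one]; omega),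
        List.getElem?_eq_none (by simp [PySem.List.length_pyRange_one]; omega)]

-- ===== VERDICT (by name: the statement is the Claim_ definition above) =====
theorem get_sprite_position_spec : Claim_equal_get_sprite_position := by
  intro sprite_pos sprite_width _
  exact band_eq sprite_pos sprite_width
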